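-- pv_equiv track=rewrite | github.com/kiwidamien/katas | 2022/day07_puzzle.py | replace_lines
-- ===== SOURCE A (Python) =====
-- from typing import List, Tuple
--
-- def visible_line(nums: List[int]) -> List[int]:
--     current_floor = -1
--     visible = []
--     for index, first in enumerate(nums):
--         if first > current_floor:
--             visible.append(index)
--         current_floor = max(first, current_floor)
--     return visible
--
-- def replace_lines(num: List[int]) -> List[int]:
--     num = num[:]
--     start_visible, end_visible = visible_line(num), visible_line(num[::-1])
--     for i in start_visible:
--         num[i] = -1
--     for i in end_visible:
--         num[len(num) - 1 -i] = -1
--     return num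
-- ===== SOURCE B (Python) =====
-- def replace_lines(num):
--     # An element is replaced by -1 iff it is strictly taller than everything
--     # before it or strictly taller than everything after it (floor -1).
--     return [
--         -1 if x > max([-1] + num[:i]) or x > max([-1] + num[i + 1:]) else x
--         for i, x in enumerate(num)
--     ]
-- ===== Notes on version B (the rewrite author's own statement) =====
-- stated objective: simpler
-- what changed: Replaces A's two running-floor scans plus two in-place index-marking loops by a single comprehension that decides each element directly from the max of its own prefix and suffix slices (no index lists, no mutation).
import Mathlib
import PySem

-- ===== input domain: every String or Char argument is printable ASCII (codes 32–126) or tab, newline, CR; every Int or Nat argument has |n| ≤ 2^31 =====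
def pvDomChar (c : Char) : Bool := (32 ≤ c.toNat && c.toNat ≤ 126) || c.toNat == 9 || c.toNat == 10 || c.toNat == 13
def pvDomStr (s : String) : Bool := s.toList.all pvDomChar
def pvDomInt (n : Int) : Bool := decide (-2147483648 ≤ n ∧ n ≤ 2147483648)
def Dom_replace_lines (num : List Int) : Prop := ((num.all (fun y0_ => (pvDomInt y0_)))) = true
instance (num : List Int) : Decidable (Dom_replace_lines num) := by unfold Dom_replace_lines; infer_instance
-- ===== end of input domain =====

-- B replaces A's two visible-index scans and two in-place marking loops by one comprehension
-- deciding each element from the max of its prefix and suffix slices (objective: simpler; not faster).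

-- ===== PORT A =====
-- helper visible_line: the running-floor loop over enumerate(nums)
def visible_line (nums : List Int) : List Int :=
  ((PySem.List.enumerate nums 0).foldl
    (fun (st : Int × List Int) (p : Int × Int) =>
      (max p.2 st.1, if p.2 > st.1 then st.2 ++ [p.1] else st.2))
    (-1, [])).2

def replace_lines (num : List Int) : List Int :=
  let num1 := PySem.List.slice num none none          -- num[:]
  let start_visible := visible_line num1
  let end_visible := visible_line ((PySem.List.slice? num1 none none (-1)).getD [])  -- num[::-1]
  -- num[i] = -1 : every i produced by visible_line is a valid nonneg index, so List.set is exact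
  let num2 := start_visible.foldl (fun l i => l.set i.toNat (-1)) num1
  let num3 := end_visible.foldl (fun l i => l.set (((l.length : Int) - 1 - i).toNat) (-1)) num2
  num3

-- ===== PORT B =====
-- one comprehension over enumerate(num); max([-1] + slice) ported with PySem.List.max?
def replace_lines_alt (num : List Int) : List Int :=
  (PySem.List.enumerate num 0).map (fun p =>
    if p.2 > (PySem.List.max? ((-1) :: PySem.List.slice num none (some p.1)) (fun a => a)).getD (-1)
       ∨ p.2 > (PySem.List.max? ((-1) :: PySem.List.slice num (some (p.1 + 1)) none) (fun a => a)).getD (-1)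
    then -1 else p.2)

-- ===== PRECONDITION & SPEC =====
def Spec_replace_lines (num : List Int) (out : List Int) : Prop := out = replace_lines_alt num
instance (num : List Int) (out : List Int) : Decidable (Spec_replace_lines num out) := by unfold Spec_replace_lines; infer_instance

-- ===== CLAIM (what is proved, stated in full; the proofs are below) =====
def Claim_equal_replace_lines : Prop := ∀ (num : List Int), Dom_replace_lines num → Spec_replace_lines num (replace_lines num)

-- ===== LEMMAS AND PROOFS =====

-- proof-only prefix-maximum table with sentinel m
def pmaxAux (m : Int) : List Int → List Int
  | [] => []
  | x :: xs => m :: pmaxAux (max x m) xs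

-- proof-only recursive form of visible_line: absolute indices, floor m, next index s
def vis (m s : Int) : List Int → List Int
  | [] => []
  | x :: xs => if x > m then s :: vis (max x m) (s + 1) xs else vis (max x m) (s + 1) xs

-- proof-only: mark elements of l at positions where xs beats the running prefix max
def markL (m : Int) : List Int → List Int → List Int
  | [], l => l
  | _ :: _, [] => []
  | x :: xs, a :: l => (if x > m then -1 else a) :: markL (max x m) xs l

theorem foldA (xs : List Int) (s m : Int) (acc : List Int) :
    ((PySem.List.enumerate xs s).foldl
      (fun (st : Int × List Int) (p : Int × Int) =>
        (max p.2 st.1, if p.2 > st.1 then st.2 ++ [p.1] else st.2))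
      (m, acc)).2 = acc ++ vis m s xs := by
  induction xs generalizing s m acc with
  | nil => simp [PySem.List.enumerate_nil, vis]
  | cons x xs ih =>
    rw [PySem.List.enumerate_cons]
    simp only [List.foldl_cons]
    by_cases h : x > m
    · simp [h, vis, ih, List.append_assoc]
    · simp [h, vis, ih]

theorem visible_line_eq (nums : List Int) : visible_line nums = vis (-1) 0 nums := by
  unfold visible_line
  simpa using foldA nums 0 (-1) []

theorem markL_length (xs l : List Int) (m : Int) (h : l.length = xs.length) :
    (markL m xs l).length = l.length := by
  induction xs generalizing m l with
  | nil => simp [markL]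
  | cons x xs ih =>
    cases l with
    | nil => simp at h
    | cons a l =>
      simp only [markL, List.length_cons]
      rw [ih _ _ (by simpa using h)]

theorem pmaxAux_length (m : Int) (xs : List Int) : (pmaxAux m xs).length = xs.length := by
  induction xs generalizing m with
  | nil => rfl
  | cons x xs ih => simp [pmaxAux, ih]

theorem vis_bounds (xs : List Int) (m s i : Int) (h : i ∈ vis m s xs) :
    s ≤ i ∧ i < s + (xs.length : Int) := by
  induction xs generalizing m s with
  | nil => simp [vis] at h
  | cons x xs ih =>
    simp only [vis] at h
    simp only [List.length_cons, Nat.cast_add, Nat.cast_one]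
    by_cases hx : x > m
    · simp only [hx, if_true, List.mem_cons] at h
      rcases h with h | h
      · subst h; omega
      · have := ih (max x m) (s + 1) h; omega
    · simp only [hx, if_false] at h
      have := ih (max x m) (s + 1) h; omega

theorem setFold (xs : List Int) (m : Int) (pre rest : List Int)
    (h : rest.length = xs.length) :
    (vis m (pre.length : Int) xs).foldl (fun l i => l.set i.toNat (-1)) (pre ++ rest)
      = pre ++ markL m xs rest := by
  induction xs generalizing m pre rest with
  | nil =>
    cases rest with
    | nil => simp [vis, markL]
    | cons a l => simp at h
  | cons x xs ih =>
    cases rest with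
    | nil => simp at h
    | cons a l =>
      have hl : l.length = xs.length := by simpa using h
      by_cases hx : x > m
      · simp only [vis, hx, if_true, List.foldl_cons]
        have hset : (pre ++ a :: l).set ((pre.length : Int)).toNat (-1)
            = (pre ++ [(-1 : Int)]) ++ l := by
          simp
        rw [hset]
        have := ih (max x m) (pre ++ [(-1 : Int)]) l hl
        simp only [List.length_append, List.length_cons, List.length_nil] at this
        push_cast at this
        rw [this]
        simp [markL, hx, List.append_assoc]
      · simp only [vis, hx, if_false]
        have heq : (pre ++ a :: l) = (pre ++ [a]) ++ l := by simp [List.append_assoc]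
        rw [heq]
        have := ih (max x m) (pre ++ [a]) l hl
        simp only [List.length_append, List.length_cons, List.length_nil] at this
        push_cast at this
        rw [this]
        simp [markL, hx, List.append_assoc]

theorem set_rev (l : List Int) (i : Int) (h0 : 0 ≤ i) (h1 : i < (l.length : Int)) :
    l.set (((l.length : Int) - 1 - i).toNat) (-1)
      = (l.reverse.set i.toNat (-1)).reverse := by
  apply List.ext_getElem
  · simp
  · intro j hj hj'
    have hjl : j < l.length := by simpa using hj
    have hi : i.toNat < l.length := by omega
    rw [List.getElem_reverse]
    simp only [List.getElem_set, List.length_set, List.length_reverse]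
    have hc : (((l.length : Int) - 1 - i).toNat = j) ↔ (i.toNat = l.length - 1 - j) := by
      omega
    by_cases hcase : ((l.length : Int) - 1 - i).toNat = j
    · simp [hcase, hc.mp hcase]
    · have : ¬ (i.toNat = l.length - 1 - j) := fun hh => hcase (hc.mpr hh)
      simp only [hcase, if_false, this, if_false]
      rw [List.getElem_reverse]
      congr 1
      omega

theorem revFold (marks : List Int) (l : List Int)
    (hb : ∀ i ∈ marks, 0 ≤ i ∧ i < (l.length : Int)) :
    marks.foldl (fun l i => l.set (((l.length : Int) - 1 - i).toNat) (-1)) l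
      = (marks.foldl (fun l i => l.set i.toNat (-1)) l.reverse).reverse := by
  induction marks generalizing l with
  | nil => simp
  | cons i marks ih =>
    simp only [List.foldl_cons]
    have hbi := hb i (List.mem_cons_self ..)
    have hstep : l.set (((l.length : Int) - 1 - i).toNat) (-1)
        = (l.reverse.set i.toNat (-1)).reverse := set_rev l i hbi.1 hbi.2
    rw [hstep, ih]
    · rw [List.reverse_reverse]
    · intro j hj
      have := hb j (List.mem_cons_of_mem _ hj)
      simpa using this

theorem markL_eq_zipWith (xs : List Int) (m : Int) (l : List Int)
    (h : l.length = xs.length) :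
    markL m xs l
      = List.zipWith (fun (p : Int × Int) a => if p.1 > p.2 then -1 else a)
          (xs.zip (pmaxAux m xs)) l := by
  induction xs generalizing m l with
  | nil =>
    cases l with
    | nil => simp [markL, pmaxAux]
    | cons a l => simp at h
  | cons x xs ih =>
    cases l with
    | nil => simp at h
    | cons a l =>
      have h' : l.length = xs.length := by simpa using h
      simp [markL, pmaxAux, ih _ _ h']

theorem zipWith_rev {α β γ : Type} (f : α → β → γ) (l1 : List α) (l2 : List β)
    (h : l1.length = l2.length) :
    (List.zipWith f l1 l2).reverse = List.zipWith f l1.reverse l2.reverse := by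
  induction l1 generalizing l2 with
  | nil => simp
  | cons x l1 ih =>
    cases l2 with
    | nil => simp at h
    | cons y l2 =>
      have h' : l1.length = l2.length := by simpa using h
      simp only [List.zipWith_cons_cons, List.reverse_cons, ih l2 h']
      rw [List.zipWith_append (by simp [h'])]
      simp

theorem zip_rev {α β : Type} (l1 : List α) (l2 : List β) (h : l1.length = l2.length) :
    (l1.zip l2).reverse = l1.reverse.zip l2.reverse := by
  simpa [List.zip] using zipWith_rev Prod.mk l1 l2 h

theorem final_zip (num P S : List Int) (hP : P.length = num.length)
    (hS : S.length = num.length) :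
    List.zipWith (fun (p : Int × Int) a => if p.1 > p.2 then -1 else a) (num.zip S)
        (List.zipWith (fun (p : Int × Int) a => if p.1 > p.2 then -1 else a) (num.zip P) num)
      = (num.zip (P.zip S)).map (fun p => if p.1 > p.2.1 ∨ p.1 > p.2.2 then -1 else p.1) := by
  induction num generalizing P S with
  | nil => simp
  | cons x num ih =>
    cases P with
    | nil => simp at hP
    | cons p P =>
      cases S with
      | nil => simp at hS
      | cons s S =>
        have hP' : P.length = num.length := by simpa using hP
        have hS' : S.length = num.length := by simpa using hS
        simp only [List.zip_cons_cons, List.zipWith_cons_cons, List.map_cons, ih P S hP' hS']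
        congr 1
        by_cases h1 : x > s <;> by_cases h2 : x > p <;> simp [h1, h2]

-- A's program equals the zip/map over prefix- and suffix-max tables
theorem a_eq_zip (num : List Int) :
    replace_lines num
      = (num.zip ((pmaxAux (-1) num).zip ((pmaxAux (-1) num.reverse).reverse))).map
          (fun p => if p.1 > p.2.1 ∨ p.1 > p.2.2 then -1 else p.1) := by
  unfold replace_lines
  simp only [PySem.List.slice_none_none, PySem.List.slice?_none_none_neg_one, Option.getD_some]
  rw [visible_line_eq, visible_line_eq]
  have h1 : (vis (-1) 0 num).foldl (fun l i => l.set i.toNat (-1)) num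
      = markL (-1) num num := by
    have := setFold num (-1) [] num rfl
    simpa using this
  rw [h1]
  set l1 := markL (-1) num num with hl1
  have hlen1 : l1.length = num.length := markL_length num num (-1) rfl
  have h2 : (vis (-1) 0 num.reverse).foldl
        (fun l i => l.set (((l.length : Int) - 1 - i).toNat) (-1)) l1
      = ((vis (-1) 0 num.reverse).foldl (fun l i => l.set i.toNat (-1)) l1.reverse).reverse := by
    apply revFold
    intro i hi
    have := vis_bounds num.reverse (-1) 0 i hi
    simp only [List.length_reverse] at this
    constructor
    · omega
    · rw [hlen1]; omega
  rw [h2]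
  have h3 : (vis (-1) 0 num.reverse).foldl (fun l i => l.set i.toNat (-1)) l1.reverse
      = markL (-1) num.reverse l1.reverse := by
    have := setFold num.reverse (-1) [] l1.reverse (by simp [hlen1])
    simpa using this
  rw [h3]
  rw [markL_eq_zipWith _ _ _ (by simp [hlen1]), hl1, markL_eq_zipWith num _ num rfl]
  rw [zipWith_rev _ _ _ (by simp [List.length_zip, pmaxAux_length])]
  rw [List.reverse_reverse]
  rw [zip_rev _ _ (by simp [pmaxAux_length]), List.reverse_reverse]
  exact final_zip num (pmaxAux (-1) num) ((pmaxAux (-1) num.reverse).reverse)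
    (pmaxAux_length _ _) (by simp [pmaxAux_length])

-- ===== B-side lemmas =====

theorem max?_cons : ∀ (l : List Int) (m : Int),
    PySem.List.max? (m :: l) (fun a => a) = some (l.foldl max m) := by
  intro l
  induction l with
  | nil => intro m; rfl
  | cons a l ih =>
    intro m
    have h1 : PySem.List.max? (m :: a :: l) (fun a => a)
        = PySem.List.max? (max m a :: l) (fun a => a) := by
      by_cases h : m < a
      · simp [PySem.List.max?, h, max_eq_right h.le]
      · simp [PySem.List.max?, h, max_eq_left (not_lt.mp h)]
    rw [h1, ih, List.foldl_cons]

theorem foldl_max_init (l : List Int) : ∀ a b : Int,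
    l.foldl max (max a b) = max a (l.foldl max b) := by
  induction l with
  | nil => intro a b; rfl
  | cons x l ih =>
    intro a b
    simp only [List.foldl_cons]
    rw [max_assoc, ih]

theorem foldl_max_reverse (l : List Int) : ∀ a : Int,
    l.reverse.foldl max a = l.foldl max a := by
  induction l with
  | nil => intro a; rfl
  | cons x l ih =>
    intro a
    simp only [List.reverse_cons, List.foldl_append, List.foldl_cons, ih]
    rw [max_comm a x, foldl_max_init l x a]
    exact max_comm _ _

theorem enum_getElem? (xs : List Int) : ∀ (s : Int) (i : Nat), i < xs.length →
    (PySem.List.enumerate xs s)[i]? = some (s + (i : Int), xs[i]!) := by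
  induction xs with
  | nil => intro s i h; simp at h
  | cons x xs ih =>
    intro s i h
    rw [PySem.List.enumerate_cons]
    cases i with
    | zero => simp
    | succ j =>
      have hj : j < xs.length := by simpa using h
      rw [List.getElem?_cons_succ, ih (s + 1) j hj]
      have hx : (x :: xs)[j + 1]! = xs[j]! := by
        simp [List.getElem!_eq_getElem?_getD]
      rw [hx]
      congr 2
      push_cast
      ring

theorem pmaxAux_getElem? (xs : List Int) : ∀ (m : Int) (i : Nat), i < xs.length →
    (pmaxAux m xs)[i]? = some ((xs.take i).foldl max m) := by
  induction xs with
  | nil => intro m i h; simp at h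
  | cons x xs ih =>
    intro m i h
    cases i with
    | zero => simp [pmaxAux]
    | succ j =>
      have hj : j < xs.length := by simpa using h
      simp only [pmaxAux, List.getElem?_cons_succ, List.take_succ_cons, List.foldl_cons]
      rw [ih (max x m) j hj, max_comm x m]

-- B's program equals the same zip/map over prefix- and suffix-max tables
theorem alt_eq_zip (num : List Int) :
    replace_lines_alt num
      = (num.zip ((pmaxAux (-1) num).zip ((pmaxAux (-1) num.reverse).reverse))).map
          (fun p => if p.1 > p.2.1 ∨ p.1 > p.2.2 then -1 else p.1) := by
  apply List.ext_getElem
  · simp [replace_lines_alt, PySem.List.length_enumerate, pmaxAux_length]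
  · intro i h1 h2
    have hn : i < num.length := by
      simpa [replace_lines_alt, PySem.List.length_enumerate] using h1
    have hE : i < (PySem.List.enumerate num 0).length := by
      simpa [PySem.List.length_enumerate] using hn
    have henum : (PySem.List.enumerate num 0)[i]'hE = ((i : Int), num[i]'hn) := by
      have h' := enum_getElem? num 0 i hn
      rw [List.getElem?_eq_getElem hE] at h'
      have hb : num[i]! = num[i]'hn := by
        simp [List.getElem!_eq_getElem?_getD, List.getElem?_eq_getElem hn]
      rw [hb] at h'
      simpa using Option.some.inj h'
    -- table entries
    have hPlen : i < (pmaxAux (-1) num).length := by simpa [pmaxAux_length] using hn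
    have hP : (pmaxAux (-1) num)[i]'hPlen = (num.take i).foldl max (-1) := by
      have h' := pmaxAux_getElem? num (-1) i hn
      rw [List.getElem?_eq_getElem hPlen] at h'
      exact Option.some.inj h'
    have hSlen : i < ((pmaxAux (-1) num.reverse).reverse).length := by
      simpa [pmaxAux_length] using hn
    have hS : ((pmaxAux (-1) num.reverse).reverse)[i]'hSlen
        = (num.drop (i + 1)).foldl max (-1) := by
      rw [List.getElem_reverse]
      have hidx : (pmaxAux (-1) num.reverse).length - 1 - i < num.reverse.length := by
        simp only [pmaxAux_length, List.length_reverse]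
        omega
      have h' := pmaxAux_getElem? num.reverse (-1) _ hidx
      rw [List.getElem?_eq_getElem (by simpa [pmaxAux_length] using hidx)] at h'
      rw [Option.some.inj h']
      have htake : num.reverse.take ((pmaxAux (-1) num.reverse).length - 1 - i)
          = (num.drop (i + 1)).reverse := by
        rw [List.reverse_drop]
        congr 1
        simp only [pmaxAux_length, List.length_reverse]
        omega
      rw [htake, foldl_max_reverse]
    -- slices
    have hsl : PySem.List.slice num none (some (i : Int)) = num.take i :=
      PySem.List.slice_to_natCast num i
    have hsr : PySem.List.slice num (some ((i : Int) + 1)) none = num.drop (i + 1) := by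
      have hc : ((i : Int) + 1) = ((i + 1 : Nat) : Int) := by push_cast; ring
      rw [hc]
      exact PySem.List.slice_from_natCast num (i + 1)
    simp only [replace_lines_alt, List.getElem_map, List.getElem_zip, henum, hsl, hsr,
      max?_cons, Option.getD_some, hP, hS]

-- ===== VERDICT (by name: the statement is the Claim_ definition above) =====
theorem replace_lines_spec : Claim_equal_replace_lines := by
  intro num _
  unfold Spec_replace_lines
  rw [a_eq_zip, alt_eq_zip]
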